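-- pv_equiv track=rewrite | github.com/Shubh1815/Algorithms | graph-traversal.py | dfs_itr
-- ===== SOURCE A (Python) =====
-- def dfs_itr(graph, starting_node):
-- 	visited = [False] * len(graph)
--
-- 	stack = [starting_node]
-- 	order = []
-- 	while stack:
-- 		node = stack.pop(-1)
-- 		if not visited[node]:
-- 			visited[node] = True
-- 			order.append(node)
-- 			for n in graph[node]:
-- 				stack.append(n)
--
-- 	return order
-- ===== SOURCE B (Python) =====
-- def dfs_itr(graph, starting_node):
--     # Frame-stack DFS: marks nodes on first discovery and keeps one frame of
--     # still-unprocessed neighbors per open node, instead of A's node stack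
--     # with duplicates and mark-on-pop. Popping each frame from its end makes
--     # the traversal order identical to A's.
--     visited = [False] * len(graph)
--     order = []
--     frames = []
--     if not visited[starting_node]:
--         visited[starting_node] = True
--         order.append(starting_node)
--         frames.append(list(graph[starting_node]))
--     while frames:
--         rem = frames[-1]
--         if rem:
--             nb = rem.pop()
--             if not visited[nb]:
--                 visited[nb] = True
--                 order.append(nb)
--                 frames.append(list(graph[nb]))
--         else:
--             frames.pop()
--     return order
-- ===== Notes on version B (the rewrite author's own statement) =====
-- stated objective: alternative
-- what changed: A keeps a single stack of node ids (with duplicates) and marks/visits a node when it is popped; B keeps a stack of per-node frames of still-unprocessed neighbors and marks/visits each node at first discovery, popping each frame from its end, which yields the identical traversal order without ever storing duplicate stack entries.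
-- outside the precondition, e.g. on dfs_itr([[0], [5]], 0): A returns [0], B returns [0]
import Mathlib
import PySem

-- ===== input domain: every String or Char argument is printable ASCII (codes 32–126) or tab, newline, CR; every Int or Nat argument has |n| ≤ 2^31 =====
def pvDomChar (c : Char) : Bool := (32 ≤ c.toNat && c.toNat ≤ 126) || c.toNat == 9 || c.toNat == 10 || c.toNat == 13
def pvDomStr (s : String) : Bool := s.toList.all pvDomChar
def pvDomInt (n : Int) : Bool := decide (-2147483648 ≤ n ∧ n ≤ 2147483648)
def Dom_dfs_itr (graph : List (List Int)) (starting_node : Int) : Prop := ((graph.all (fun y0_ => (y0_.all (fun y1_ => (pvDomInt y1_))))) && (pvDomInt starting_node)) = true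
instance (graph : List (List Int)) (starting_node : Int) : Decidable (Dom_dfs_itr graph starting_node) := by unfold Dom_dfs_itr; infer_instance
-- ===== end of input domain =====

-- B replaces A's duplicate-holding node stack (mark on pop) by a stack of per-node frames of
-- still-unprocessed neighbors (mark on first discovery); same traversal order, no duplicates kept.

-- marking an unvisited slot strictly decreases the number of unvisited slots
-- (needed by the ports' termination measures, hence stated above them)
theorem count_set_true_lt (v : List Bool) (k : Nat) (hk : v[k]? = some false) :
    (v.set k true).count false < v.count false := by
  induction v generalizing k with
  | nil => simp at hk
  | cons x xs ih =>
    cases k with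
    | zero =>
      simp at hk; subst hk
      simp
    | succ k =>
      simp at hk
      simpa [List.count_cons] using ih k hk

theorem count_pySetD_lt (v : List Bool) (i : Int) (h : PySem.List.pyGet? v i = some false) :
    (PySem.List.pySetD v i true).count false < v.count false := by
  unfold PySem.List.pyGet? at h
  cases hk : PySem.List.pyIdx? v.length i with
  | none => rw [hk] at h; simp at h
  | some k =>
    rw [hk] at h; simp at h
    have : PySem.List.pySetD v i true = v.set k true := by
      unfold PySem.List.pySetD PySem.List.pySet?
      rw [hk]; rfl
    rw [this]
    exact count_set_true_lt v k h

-- ===== PORT A =====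
-- A's stack is represented top-first (Python appends/pops at the END of the list):
-- pop(-1) is taking the head; pushing graph[node] in order is prepending its reverse.
def dfsLoopA (graph : List (List Int)) (v : List Bool) (stack : List Int) (ord : List Int) : List Int :=
  match stack with
  | [] => ord
  | node :: rest =>
    match hv : PySem.List.pyGet? v node with
    | none => ord   -- visited[node]: IndexError in Python; outside Pre_
    | some true => dfsLoopA graph v rest ord
    | some false =>
      match PySem.List.pyGet? graph node with
      | none => ord -- graph[node]: IndexError in Python; outside Pre_ (unreachable: |v| = |graph|)
      | some nbrs =>
        dfsLoopA graph (PySem.List.pySetD v node true) (nbrs.reverse ++ rest) (ord ++ [node])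
  termination_by (v.count false, stack.length)
  decreasing_by
  · exact Prod.Lex.right _ (by simp)
  · exact Prod.Lex.left _ _ (count_pySetD_lt v node hv)

def dfs_itr (graph : List (List Int)) (starting_node : Int) : List Int :=
  dfsLoopA graph (List.replicate graph.length false) [starting_node] []

-- ===== PORT B =====
-- frames are represented top-first as well, and each frame with its next element at the HEAD
-- (Python pops from the frame's end, so a pushed frame is list(graph[nb]) reversed).
def dfsLoopB (graph : List (List Int)) (v : List Bool) (ord : List Int)
    (frames : List (List Int)) : List Int :=
  match frames with
  | [] => ord
  | [] :: rest => dfsLoopB graph v ord rest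
  | (nb :: rem) :: rest =>
    match hv : PySem.List.pyGet? v nb with
    | none => ord   -- visited[nb]: IndexError in Python; outside Pre_
    | some true => dfsLoopB graph v ord (rem :: rest)
    | some false =>
      match PySem.List.pyGet? graph nb with
      | none => ord -- graph[nb]: IndexError in Python; outside Pre_ (unreachable: |v| = |graph|)
      | some l =>
        dfsLoopB graph (PySem.List.pySetD v nb true) (ord ++ [nb]) (l.reverse :: rem :: rest)
  termination_by (v.count false, (frames.map List.length).sum + frames.length)
  decreasing_by
  · exact Prod.Lex.right _ (by simp)
  · exact Prod.Lex.right _ (by simp)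
  · exact Prod.Lex.left _ _ (count_pySetD_lt v nb hv)

def dfs_itr_alt (graph : List (List Int)) (starting_node : Int) : List Int :=
  let v := List.replicate graph.length false
  match PySem.List.pyGet? v starting_node with
  | none => []      -- visited[starting_node]: IndexError in Python; outside Pre_
  | some true => dfsLoopB graph v [] []
  | some false =>
    match PySem.List.pyGet? graph starting_node with
    | none => []    -- graph[starting_node]: IndexError; outside Pre_ (unreachable: same length)
    | some l => dfsLoopB graph (PySem.List.pySetD v starting_node true) [starting_node] [l.reverse]

-- ===== PRECONDITION & SPEC =====
-- Pre_ requires the start and EVERY listed neighbor to be a valid (possibly negative) Python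
-- index into graph. A raises IndexError exactly when an invalid node is REACHED; reachability is
-- not closed-form, so Pre_ conservatively also excludes graphs whose only invalid entries are
-- unreachable — inputs on which A returns (and B returns the same value); see the claim cites.
def Pre_dfs_itr (graph : List (List Int)) (starting_node : Int) : Prop :=
  PySem.Raise.InRange graph.length starting_node ∧
    ∀ l ∈ graph, ∀ m ∈ l, PySem.Raise.InRange graph.length m
instance (graph : List (List Int)) (starting_node : Int) : Decidable (Pre_dfs_itr graph starting_node) := by
  unfold Pre_dfs_itr PySem.Raise.InRange; infer_instance

def pvWitness_dfs_itr : List (List Int) × Int := ([[1, 2], [2], [0, -1]], 0)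

def Spec_dfs_itr (graph : List (List Int)) (starting_node : Int) (out : List Int) : Prop := out = dfs_itr_alt graph starting_node
instance (graph : List (List Int)) (starting_node : Int) (out : List Int) : Decidable (Spec_dfs_itr graph starting_node out) := by unfold Spec_dfs_itr; infer_instance

-- ===== CLAIM (what is proved, stated in full; the proofs are below) =====
def Claim_equal_dfs_itr : Prop := ∀ (graph : List (List Int)) (starting_node : Int), Dom_dfs_itr graph starting_node → Pre_dfs_itr graph starting_node → Spec_dfs_itr graph starting_node (dfs_itr graph starting_node)

-- ===== LEMMAS AND PROOFS =====

-- fueled recursive DFS: the common functional specification both loops are reduced to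
def visitF (graph : List (List Int)) : Nat → Int → List Bool × List Int → List Bool × List Int
  | 0, _, s => s
  | f + 1, node, s =>
    match PySem.List.pyGet? s.1 node with
    | none => s
    | some true => s
    | some false =>
      match PySem.List.pyGet? graph node with
      | none => s
      | some l =>
        l.reverse.foldl (fun t m => visitF graph f m t) (PySem.List.pySetD s.1 node true, s.2 ++ [node])

theorem foldl_visitF_inv (graph : List (List Int)) (f : Nat)
    (h : ∀ n s, (visitF graph f n s).1.length = s.1.length ∧
      (visitF graph f n s).1.count false ≤ s.1.count false) :
    ∀ (l : List Int) s, ((l.foldl (fun t m => visitF graph f m t) s).1.length = s.1.length ∧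
      (l.foldl (fun t m => visitF graph f m t) s).1.count false ≤ s.1.count false) := by
  intro l
  induction l with
  | nil => intro s; simp
  | cons n t ih =>
    intro s
    obtain ⟨h1, h2⟩ := h n s
    obtain ⟨h3, h4⟩ := ih (visitF graph f n s)
    exact ⟨by simp [List.foldl_cons]; omega, by simp [List.foldl_cons]; omega⟩

theorem visitF_inv (graph : List (List Int)) :
    ∀ f n s, (visitF graph f n s).1.length = s.1.length ∧
      (visitF graph f n s).1.count false ≤ s.1.count false := by
  intro f
  induction f with
  | zero => intro n s; simp [visitF]
  | succ f ih =>
    intro n s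
    simp only [visitF]
    cases hm : PySem.List.pyGet? s.1 n with
    | none => simp
    | some b =>
      cases b with
      | true => simp
      | false =>
        simp only
        cases hg : PySem.List.pyGet? graph n with
        | none => simp
        | some l =>
          simp only
          obtain ⟨h1, h2⟩ := foldl_visitF_inv graph f ih l.reverse
            (PySem.List.pySetD s.1 n true, s.2 ++ [n])
          have hlen := PySem.List.length_pySetD s.1 n true
          have hcnt := count_pySetD_lt s.1 n hm
          exact ⟨by simpa [hlen] using h1, by simp at h2 ⊢; omega⟩

theorem visitF_fuel_irrel (graph : List (List Int)) :
    ∀ c (s : List Bool × List Int) (l : List Int) f g, s.1.count false ≤ c →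
      s.1.count false < f → s.1.count false < g →
      l.foldl (fun t m => visitF graph f m t) s = l.foldl (fun t m => visitF graph g m t) s := by
  intro c
  induction c using Nat.strong_induction_on with
  | _ c ihc =>
    intro s l f g hc hf hg
    obtain ⟨f', rfl⟩ : ∃ f'', f = f'' + 1 := ⟨f - 1, by omega⟩
    obtain ⟨g', rfl⟩ : ∃ g'', g = g'' + 1 := ⟨g - 1, by omega⟩
    induction l generalizing s with
    | nil => rfl
    | cons n t ihl =>
      have hstep : visitF graph (f' + 1) n s = visitF graph (g' + 1) n s := by
        simp only [visitF]
        cases hm : PySem.List.pyGet? s.1 n with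
        | none => rfl
        | some b =>
          cases b with
          | true => rfl
          | false =>
            simp only
            cases hgn : PySem.List.pyGet? graph n with
            | none => rfl
            | some l' =>
              simp only
              have hcnt := count_pySetD_lt s.1 n hm
              exact ihc ((PySem.List.pySetD s.1 n true).count false) (by omega)
                (PySem.List.pySetD s.1 n true, s.2 ++ [n]) l'.reverse f' g'
                le_rfl (by change (PySem.List.pySetD s.1 n true).count false < f'; omega)
                (by change (PySem.List.pySetD s.1 n true).count false < g'; omega)
      rw [List.foldl_cons, List.foldl_cons, hstep]
      have hX := (visitF_inv graph (g' + 1) n s).2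
      exact ihl (visitF graph (g' + 1) n s) (by omega) (by omega) (by omega)

theorem loopA_eq_foldl (graph : List (List Int))
    (hg : ∀ l ∈ graph, ∀ m ∈ l, PySem.Raise.InRange graph.length m) :
    ∀ c (v : List Bool), v.count false ≤ c → v.length = graph.length →
      ∀ stack, (∀ m ∈ stack, PySem.Raise.InRange graph.length m) →
      ∀ ord f, v.count false < f →
      dfsLoopA graph v stack ord = (stack.foldl (fun t m => visitF graph f m t) (v, ord)).2 := by
  intro c
  induction c using Nat.strong_induction_on with
  | _ c ihc =>
    have inner : ∀ (stack : List Int) (v : List Bool), v.count false ≤ c →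
        v.length = graph.length → (∀ m ∈ stack, PySem.Raise.InRange graph.length m) →
        ∀ ord f, v.count false < f →
        dfsLoopA graph v stack ord = (stack.foldl (fun t m => visitF graph f m t) (v, ord)).2 := by
      intro stack
      induction stack with
      | nil => intro v hc hlen hstack ord f hf; simp [dfsLoopA]
      | cons node rest ihl =>
        intro v hc hlen hstack ord f hf
        obtain ⟨f', rfl⟩ : ∃ f'', f = f'' + 1 := ⟨f - 1, by omega⟩
        have hnode : PySem.Raise.InRange graph.length node := hstack node (by simp)
        have hrest : ∀ m ∈ rest, PySem.Raise.InRange graph.length m :=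
          fun m hm => hstack m (by simp [hm])
        rw [List.foldl_cons]
        unfold dfsLoopA
        split
        · next hm =>
          exact absurd ((PySem.List.pyGet?_eq_none_iff v node).1 hm)
            (by rw [hlen]; exact fun h => h hnode)
        · next hm =>
          have hstep : visitF graph (f' + 1) node (v, ord) = (v, ord) := by
            simp only [visitF, hm]
          rw [hstep]
          exact ihl v hc hlen hrest ord (f' + 1) hf
        · next hm =>
          cases hgn : PySem.List.pyGet? graph node with
          | none =>
            exact absurd ((PySem.List.pyGet?_eq_none_iff graph node).1 hgn)
              (fun h => h hnode)
          | some nbrs =>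
            show dfsLoopA graph (PySem.List.pySetD v node true) (nbrs.reverse ++ rest)
                (ord ++ [node]) = _
            have hcnt := count_pySetD_lt v node hm
            have hv'len : (PySem.List.pySetD v node true).length = graph.length :=
              (PySem.List.length_pySetD v node true).trans hlen
            have hnbrs : ∀ m ∈ nbrs.reverse ++ rest, PySem.Raise.InRange graph.length m := by
              intro m hmm
              rcases List.mem_append.1 hmm with h | h
              · exact hg nbrs (PySem.List.mem_of_pyGet?_eq_some graph hgn) m (List.mem_reverse.1 h)
              · exact hrest m h
            rw [ihc ((PySem.List.pySetD v node true).count false) (by omega)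
              (PySem.List.pySetD v node true) le_rfl hv'len (nbrs.reverse ++ rest) hnbrs
              (ord ++ [node]) (f' + 1) (by omega)]
            rw [List.foldl_append]
            have hstep : visitF graph (f' + 1) node (v, ord) =
                nbrs.reverse.foldl (fun t m => visitF graph f' m t)
                  (PySem.List.pySetD v node true, ord ++ [node]) := by
              simp only [visitF, hm, hgn]
            rw [hstep]
            rw [visitF_fuel_irrel graph ((PySem.List.pySetD v node true).count false)
              (PySem.List.pySetD v node true, ord ++ [node]) nbrs.reverse f' (f' + 1)
              le_rfl (by change (PySem.List.pySetD v node true).count false < f'; omega)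
              (by change (PySem.List.pySetD v node true).count false < f' + 1; omega)]
    exact fun v hc hlen stack hstack => inner stack v hc hlen hstack

theorem loopB_eq_foldl (graph : List (List Int))
    (hg : ∀ l ∈ graph, ∀ m ∈ l, PySem.Raise.InRange graph.length m) :
    ∀ c (v : List Bool), v.count false ≤ c → v.length = graph.length →
      ∀ frames, (∀ r ∈ frames, ∀ m ∈ r, PySem.Raise.InRange graph.length m) →
      ∀ ord f, v.count false < f →
      dfsLoopB graph v ord frames =
        (frames.foldl (fun t r => r.foldl (fun t' m => visitF graph f m t') t) (v, ord)).2 := by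
  intro c
  induction c using Nat.strong_induction_on with
  | _ c ihc =>
    have inner : ∀ (k : Nat) (frames : List (List Int)) (v : List Bool),
        (frames.map List.length).sum + frames.length ≤ k →
        v.count false ≤ c → v.length = graph.length →
        (∀ r ∈ frames, ∀ m ∈ r, PySem.Raise.InRange graph.length m) →
        ∀ ord f, v.count false < f →
        dfsLoopB graph v ord frames =
          (frames.foldl (fun t r => r.foldl (fun t' m => visitF graph f m t') t) (v, ord)).2 := by
      intro k
      induction k using Nat.strong_induction_on with
      | _ k ihk =>
        intro frames v hk hc hlen hframes ord f hf
        obtain ⟨f', rfl⟩ : ∃ f'', f = f'' + 1 := ⟨f - 1, by omega⟩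
        cases frames with
        | nil => simp [dfsLoopB]
        | cons r rest =>
          have hrest : ∀ r' ∈ rest, ∀ m ∈ r', PySem.Raise.InRange graph.length m :=
            fun r' hr' => hframes r' (by simp [hr'])
          cases r with
          | nil =>
            rw [List.foldl_cons, List.foldl_nil]
            unfold dfsLoopB
            exact ihk (k - 1) (by simp at hk ⊢; omega) rest v (by simp at hk ⊢; omega)
              hc hlen hrest ord (f' + 1) hf
          | cons nb rem =>
            have hnb : PySem.Raise.InRange graph.length nb := hframes (nb :: rem) (by simp) nb (by simp)
            have hrem : ∀ m ∈ rem, PySem.Raise.InRange graph.length m :=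
              fun m hm => hframes (nb :: rem) (by simp) m (by simp [hm])
            rw [List.foldl_cons, List.foldl_cons]
            unfold dfsLoopB
            split
            · next hm =>
              exact absurd ((PySem.List.pyGet?_eq_none_iff v nb).1 hm)
                (by rw [hlen]; exact fun h => h hnb)
            · next hm =>
              have hstep : visitF graph (f' + 1) nb (v, ord) = (v, ord) := by
                simp only [visitF, hm]
              rw [hstep]
              have := ihk (k - 1) (by simp at hk ⊢; omega) (rem :: rest) v
                (by simp at hk ⊢; omega) hc hlen
                (by
                  intro r' hr' m hm'
                  rcases List.mem_cons.1 hr' with h | h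
                  · exact hrem m (h ▸ hm')
                  · exact hrest r' h m hm')
                ord (f' + 1) hf
              rw [this, List.foldl_cons]
            · next hm =>
              cases hgn : PySem.List.pyGet? graph nb with
              | none =>
                exact absurd ((PySem.List.pyGet?_eq_none_iff graph nb).1 hgn)
                  (fun h => h hnb)
              | some l =>
                show dfsLoopB graph (PySem.List.pySetD v nb true) (ord ++ [nb])
                    (l.reverse :: rem :: rest) = _
                have hcnt := count_pySetD_lt v nb hm
                have hv'len : (PySem.List.pySetD v nb true).length = graph.length :=
                  (PySem.List.length_pySetD v nb true).trans hlen
                have hl : ∀ m ∈ l.reverse, PySem.Raise.InRange graph.length m :=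
                  fun m hmm =>
                    hg l (PySem.List.mem_of_pyGet?_eq_some graph hgn) m (List.mem_reverse.1 hmm)
                have := ihc ((PySem.List.pySetD v nb true).count false) (by omega)
                  (PySem.List.pySetD v nb true) le_rfl hv'len (l.reverse :: rem :: rest)
                  (by
                    intro r' hr' m hm'
                    rcases List.mem_cons.1 hr' with h | h
                    · exact hl m (h ▸ hm')
                    · rcases List.mem_cons.1 h with h2 | h2
                      · exact hrem m (h2 ▸ hm')
                      · exact hrest r' h2 m hm')
                  (ord ++ [nb]) (f' + 1) (by omega)
                rw [this, List.foldl_cons, List.foldl_cons]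
                have hstep : visitF graph (f' + 1) nb (v, ord) =
                    l.reverse.foldl (fun t m => visitF graph f' m t)
                      (PySem.List.pySetD v nb true, ord ++ [nb]) := by
                  simp only [visitF, hm, hgn]
                rw [hstep]
                rw [visitF_fuel_irrel graph ((PySem.List.pySetD v nb true).count false)
                  (PySem.List.pySetD v nb true, ord ++ [nb]) l.reverse f' (f' + 1)
                  le_rfl (by change (PySem.List.pySetD v nb true).count false < f'; omega)
                  (by change (PySem.List.pySetD v nb true).count false < f' + 1; omega)]
    exact fun v hc hlen frames hframes =>
      inner ((frames.map List.length).sum + frames.length) frames v le_rfl hc hlen hframes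

-- ===== VERDICT (by name: the statement is the Claim_ definition above) =====
theorem dfs_itr_spec : Claim_equal_dfs_itr := by
  intro graph start _ hpre
  obtain ⟨hs, hg⟩ := hpre
  unfold Spec_dfs_itr dfs_itr dfs_itr_alt
  have hlen : (List.replicate graph.length (false : Bool)).length = graph.length := by simp
  have hcnt : (List.replicate graph.length (false : Bool)).count false = graph.length := by simp
  have hm : PySem.List.pyGet? (List.replicate graph.length (false : Bool)) start = some false := by
    cases h : PySem.List.pyGet? (List.replicate graph.length (false : Bool)) start with
    | none =>
      exact absurd ((PySem.List.pyGet?_eq_none_iff _ start).1 h)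
        (by rw [hlen]; exact fun h' => h' hs)
    | some b =>
      have hb := List.eq_of_mem_replicate (PySem.List.mem_of_pyGet?_eq_some _ h)
      rw [hb]
  cases hgn : PySem.List.pyGet? graph start with
  | none =>
    exact absurd ((PySem.List.pyGet?_eq_none_iff graph start).1 hgn) (fun h => h hs)
  | some l =>
    have hcnt' := count_pySetD_lt (List.replicate graph.length false) start hm
    have hv'len : (PySem.List.pySetD (List.replicate graph.length false) start true).length
        = graph.length :=
      (PySem.List.length_pySetD _ start true).trans hlen
    rw [loopA_eq_foldl graph hg graph.length (List.replicate graph.length false)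
      (by omega) hlen [start] (by intro m hm'; simp at hm'; subst hm'; exact hs) []
      (graph.length + 2) (by omega)]
    rw [List.foldl_cons, List.foldl_nil]
    have hstep : visitF graph (graph.length + 2) start (List.replicate graph.length false, []) =
        l.reverse.foldl (fun t m => visitF graph (graph.length + 1) m t)
          (PySem.List.pySetD (List.replicate graph.length false) start true, [start]) := by
      simp only [visitF, hm, hgn, List.nil_append]
    rw [hstep]
    simp only [hm]
    rw [loopB_eq_foldl graph hg
      ((PySem.List.pySetD (List.replicate graph.length false) start true).count false)
      (PySem.List.pySetD (List.replicate graph.length false) start true) le_rfl hv'len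
      [l.reverse]
      (by
        intro r hr m hm'
        simp at hr; subst hr
        exact hg l (PySem.List.mem_of_pyGet?_eq_some graph hgn) m (List.mem_reverse.1 hm'))
      [start] (graph.length + 1) (by omega)]
    rw [List.foldl_cons, List.foldl_nil]
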